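-- pv_equiv track=rewrite | github.com/masc-ucsc/hagent | hagent/workflow/frequency_opt/steps/arch_agent.py | _format_hierarchy
-- ===== SOURCE A (Python) =====
-- from typing import Optional
--
-- def _format_hierarchy(hierarchy_dict: dict, synth_top: str) -> str:
--     """Format raw Locator hierarchy as a natural-language tree rooted at synth_top.
--
--     Args:
--         hierarchy_dict: From Locator.get_hierarchy(). Maps instance_path -> {module, file}.
--         synth_top: Module name (or Top$instance.path) to use as root.
--
--     Returns:
--         Human-readable hierarchy tree string.
--     """
--     instances = {k: v for k, v in hierarchy_dict.items() if not k.startswith('_')}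
--     if not instances:
--         return '(no hierarchy available)'
--
--     root_instance: Optional[str] = None
--
--     if '$' in synth_top:
--         inst_path = synth_top.split('$', 1)[1]
--         if inst_path in instances:
--             root_instance = inst_path
--
--     if root_instance is None and synth_top in instances:
--         root_instance = synth_top
--
--     if root_instance is None:
--         for ip, info in instances.items():
--             if info.get('module') == synth_top:
--                 root_instance = ip
--                 break
--
--     if root_instance is None:
--         return f'(hierarchy root "{synth_top}" not found)'
--
--     root_module = instances[root_instance].get('module', synth_top)
--
--     children: dict[str, list[tuple[str, str, str]]] = {}
--     prefix = root_instance + '.'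
--     for ip, info in instances.items():
--         if ip == root_instance or not ip.startswith(prefix):
--             continue
--         parent = ip.rsplit('.', 1)[0]
--         rel_name = ip.rsplit('.', 1)[1]
--         children.setdefault(parent, []).append((ip, info.get('module', ''), rel_name))
--
--     lines: list[str] = [f'The top-level module is {root_module}.']
--
--     def _render(inst_path: str, module_name: str, indent: int) -> None:
--         kids = children.get(inst_path, [])
--         if not kids:
--             return
--         pad = '  ' * indent
--         lines.append(f'{pad}{module_name} instantiates:')
--         for child_path, child_mod, child_rel in sorted(kids, key=lambda x: x[2]):
--             lines.append(f'{pad}  - {child_mod} (instance: {child_rel})')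
--             _render(child_path, child_mod, indent + 2)
--
--     _render(root_instance, root_module, indent=0)
--     return '\n'.join(lines)
-- ===== SOURCE B (Python) =====
-- def _format_hierarchy(hierarchy_dict: dict, synth_top: str) -> str:
--     instances = {k: v for k, v in hierarchy_dict.items() if not k.startswith('_')}
--     if not instances:
--         return '(no hierarchy available)'
--
--     root = None
--     if '$' in synth_top:
--         cand = synth_top.split('$', 1)[1]
--         if cand in instances:
--             root = cand
--     if root is None and synth_top in instances:
--         root = synth_top
--     if root is None:
--         root = next((ip for ip, info in instances.items()
--                      if info.get('module') == synth_top), None)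
--     if root is None:
--         return f'(hierarchy root "{synth_top}" not found)'
--
--     root_module = instances[root].get('module', synth_top)
--
--     children = {}
--     prefix = root + '.'
--     for ip, info in instances.items():
--         if ip == root or not ip.startswith(prefix):
--             continue
--         parent, rel = ip.rsplit('.', 1)
--         children.setdefault(parent, []).append((ip, info.get('module', ''), rel))
--
--     # Bottom-up assembly: a node's "X instantiates:" block depends only on its
--     # children's blocks, and every child path is strictly longer than its
--     # parent's, so processing parents from longest path to shortest makes each
--     # child's block available when its parent's block is assembled.  The indent
--     # of a node is recovered from its depth (dot count relative to the root).
--     base_dots = root.count('.')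
--     sub = {}
--     for p in sorted(children, key=len, reverse=True):
--         pad = '  ' * (2 * (p.count('.') - base_dots))
--         mod = root_module if p == root else (instances[p].get('module', '') if p in instances else '')
--         block = [f'{pad}{mod} instantiates:']
--         for cp, cm, cr in sorted(children[p], key=lambda x: x[2]):
--             block.append(f'{pad}  - {cm} (instance: {cr})')
--             block.extend(sub.get(cp, []))
--         sub[p] = block
--
--     return '\n'.join([f'The top-level module is {root_module}.'] + sub.get(root, []))
-- ===== Notes on version B (the rewrite author's own statement) =====
-- stated objective: alternative
-- what changed: A renders the tree with a top-down recursive _render that threads module name and indent through the call stack; B replaces the recursion by a bottom-up dynamic-programming pass: it sorts the parent keys of the children map by decreasing path length and assembles each node's 'instantiates' block from its children's already-stored blocks in a table, recomputing each node's module and indent directly from the instance path (dot depth) instead of from the recursion.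
import Mathlib
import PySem

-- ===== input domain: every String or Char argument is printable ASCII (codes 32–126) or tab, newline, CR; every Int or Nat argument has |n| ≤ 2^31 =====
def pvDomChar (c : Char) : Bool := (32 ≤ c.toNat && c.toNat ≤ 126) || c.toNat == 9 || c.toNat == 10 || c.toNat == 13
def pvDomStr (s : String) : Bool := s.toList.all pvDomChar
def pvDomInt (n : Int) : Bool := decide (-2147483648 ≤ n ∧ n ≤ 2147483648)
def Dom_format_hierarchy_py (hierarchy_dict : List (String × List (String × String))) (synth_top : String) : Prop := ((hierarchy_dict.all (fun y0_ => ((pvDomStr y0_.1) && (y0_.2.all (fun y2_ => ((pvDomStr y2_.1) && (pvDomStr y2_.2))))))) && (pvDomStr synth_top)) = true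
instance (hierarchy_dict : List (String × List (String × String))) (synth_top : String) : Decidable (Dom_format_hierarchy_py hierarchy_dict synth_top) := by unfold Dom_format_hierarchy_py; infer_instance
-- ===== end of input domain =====

-- B replaces A's top-down recursive renderer by a bottom-up table: parents are
-- processed from longest path to shortest, each node's block assembled from its
-- children's already-computed blocks (objective: alternative decomposition).

-- ===== PORT A =====
-- helpers shared by both ports (identical lines of both Python sources)

-- info.get('module', dflt) — the inner dict is an association list; Python reads it as a dict
def pvModD (info : List (String × String)) (dflt : String) : String :=
  ((PySem.Dict.ofList info).get? "module").getD dflt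

-- info.get('module') == s  (a missing key gives None, never equal to a str)
def pvModEq (info : List (String × String)) (s : String) : Bool :=
  (PySem.Dict.ofList info).get? "module" == some s

-- {k: v for k, v in hierarchy_dict.items() if not k.startswith('_')}
def pvInstances (hierarchy_dict : List (String × List (String × String))) :
    PySem.Dict String (List (String × String)) :=
  (PySem.Dict.ofList hierarchy_dict).items.foldl
    (fun d kv => if PySem.Str.startswith kv.1 "_" then d else d.insert kv.1 kv.2)
    PySem.Dict.empty

-- ip.rsplit('.', 1) on the char list: split at the LAST '.'; none = no '.' present
def pvSplitLastDot : List Char → Option (List Char × List Char)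
  | [] => none
  | c :: rest =>
      match pvSplitLastDot rest with
      | some (a, b) => some (c :: a, b)
      | none => if c = '.' then some ([], rest) else none

-- ip.rsplit('.', 1) → (parent, rel); exact for ip containing '.' (guaranteed by the
-- startswith(root + '.') guard at every use site)
def pvRsplitDot (s : String) : String × String :=
  match pvSplitLastDot s.toList with
  | some (a, b) => (String.ofList a, String.ofList b)
  | none => ("", s)

-- the children adjacency map keyed by parent path (same loop in both Pythons)
def pvChildren (instances : PySem.Dict String (List (String × String))) (root : String) :
    PySem.Dict String (List (String × String × String)) :=
  instances.items.foldl
    (fun d kv =>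
      if kv.1 == root || !(PySem.Str.startswith kv.1 (root ++ ".")) then d
      else
        d.modify (pvRsplitDot kv.1).1 []
          (fun l => l ++ [(kv.1, pvModD kv.2 "", (pvRsplitDot kv.1).2)]))
    PySem.Dict.empty

-- root resolution (same steps in both Pythons)
def pvRoot? (instances : PySem.Dict String (List (String × String))) (synth_top : String) :
    Option String :=
  let r0 : Option String :=
    if PySem.Str.isIn "$" synth_top then
      -- '$' in synth_top guarantees split('$', 1) has a second part
      let inst_path := ((PySem.Str.splitMax? synth_top "$" 1).getD []).getD 1 ""
      if instances.contains inst_path then some inst_path else none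
    else none
  let r1 := match r0 with
    | some r => some r
    | none => if instances.contains synth_top then some synth_top else none
  match r1 with
  | some r => some r
  | none => (instances.items.find? (fun kv => pvModEq kv.2 synth_top)).map (fun kv => kv.1)

-- '  ' * ind  (empty for ind ≤ 0, as in Python)
def pvPad (ind : Int) : String := String.ofList (List.replicate (2 * ind.toNat) ' ')

-- recursion fuel for A's _render: one more than the longest instance path; sufficient
-- because every child path is strictly longer than its parent key
def pvFuel (instances : PySem.Dict String (List (String × String))) : Nat :=
  instances.items.foldl (fun acc kv => max acc kv.1.toList.length) 0 + 1

-- A's recursive _render (returns the lines it would append)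
def pvRenderA (C : PySem.Dict String (List (String × String × String))) :
    Nat → String → String → Int → List String
  | 0, _, _, _ => []
  | (f + 1), p, m, ind =>
      let kids := C.getD p []
      if kids = [] then []
      else
        let pad := pvPad ind
        (PySem.List.sorted kids (fun x => x.2.2)).foldl
          (fun acc x =>
            (acc ++ [pad ++ "  - " ++ x.2.1 ++ " (instance: " ++ x.2.2 ++ ")"])
              ++ pvRenderA C f x.1 x.2.1 (ind + 2))
          [pad ++ m ++ " instantiates:"]

def format_hierarchy_py (hierarchy_dict : List (String × List (String × String))) (synth_top : String) : String :=
  let instances := pvInstances hierarchy_dict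
  if instances.items = [] then "(no hierarchy available)"
  else
    match pvRoot? instances synth_top with
    | none => "(hierarchy root \"" ++ synth_top ++ "\" not found)"
    | some root =>
        let root_module := pvModD (instances.getD root []) synth_top
        let children := pvChildren instances root
        PySem.Str.join "\n"
          (("The top-level module is " ++ root_module ++ ".")
            :: pvRenderA children (pvFuel instances) root root_module 0)

-- ===== PORT B =====

-- sum(1 for c in s if c == '.')
def pvDots (s : String) : Int :=
  s.toList.foldl (fun n c => if c == '.' then n + 1 else n) 0

-- one "X instantiates:" block, assembled from the children's stored blocks
def pvBlock (instances : PySem.Dict String (List (String × String)))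
    (C : PySem.Dict String (List (String × String × String)))
    (sub : PySem.Dict String (List String)) (root root_module p : String) : List String :=
  let pad := pvPad (2 * (pvDots p - pvDots root))
  let mod := if p == root then root_module
             else if instances.contains p then pvModD (instances.getD p []) "" else ""
  (PySem.List.sorted (C.getD p []) (fun x => x.2.2)).foldl
    (fun acc x =>
      (acc ++ [pad ++ "  - " ++ x.2.1 ++ " (instance: " ++ x.2.2 ++ ")"])
        ++ sub.getD x.1 [])
    [pad ++ mod ++ " instantiates:"]

def format_hierarchy_py_alt (hierarchy_dict : List (String × List (String × String))) (synth_top : String) : String :=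
  let instances := pvInstances hierarchy_dict
  if instances.items = [] then "(no hierarchy available)"
  else
    match pvRoot? instances synth_top with
    | none => "(hierarchy root \"" ++ synth_top ++ "\" not found)"
    | some root =>
        let root_module := pvModD (instances.getD root []) synth_top
        let children := pvChildren instances root
        let tbl := (PySem.List.sorted children.keys (fun p => PySem.Str.len p) true).foldl
          (fun sub p => sub.insert p (pvBlock instances children sub root root_module p))
          PySem.Dict.empty
        PySem.Str.join "\n"
          (("The top-level module is " ++ root_module ++ ".") :: tbl.getD root [])

-- ===== PRECONDITION & SPEC =====
def Spec_format_hierarchy_py (hierarchy_dict : List (String × List (String × String))) (synth_top : String) (out : String) : Prop := out = format_hierarchy_py_alt hierarchy_dict synth_top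
instance (hierarchy_dict : List (String × List (String × String))) (synth_top : String) (out : String) : Decidable (Spec_format_hierarchy_py hierarchy_dict synth_top out) := by unfold Spec_format_hierarchy_py; infer_instance

-- ===== CLAIM (what is proved, stated in full; the proofs are below) =====
def Claim_equal_format_hierarchy_py : Prop := ∀ (hierarchy_dict : List (String × List (String × String))) (synth_top : String), Dom_format_hierarchy_py hierarchy_dict synth_top → Spec_format_hierarchy_py hierarchy_dict synth_top (format_hierarchy_py hierarchy_dict synth_top)

-- ===== LEMMAS AND PROOFS =====

theorem pv_foldl_skip {α δ : Type} (p : α → Bool) (f : δ → α → δ) (l : List α) (init : δ) :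
    l.foldl (fun acc x => if p x then acc else f acc x) init
      = (l.filter (fun x => !p x)).foldl f init := by
  rw [← PySem.List.foldl_if_eq_foldl_filter (fun x => !p x) f l init]
  exact PySem.List.foldl_congr_mem l _ _ init (by intro acc x _; by_cases h : p x <;> simp [h])

theorem pvSplitLastDot_isSome {cs : List Char} (h : '.' ∈ cs) : (pvSplitLastDot cs).isSome := by
  induction cs with
  | nil => simp at h
  | cons c rest ih =>
      simp only [pvSplitLastDot]
      cases hr : pvSplitLastDot rest with
      | some _ => simp
      | none =>
          simp only [List.mem_cons] at h
          rcases h with h | h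
          · simp [h.symm]
          · have := ih h; rw [hr] at this; simp at this

theorem pvSplitLastDot_some {cs : List Char} {a b : List Char}
    (h : pvSplitLastDot cs = some (a, b)) : cs = a ++ '.' :: b ∧ '.' ∉ b := by
  induction cs generalizing a b with
  | nil => simp [pvSplitLastDot] at h
  | cons c rest ih =>
      simp only [pvSplitLastDot] at h
      cases hr : pvSplitLastDot rest with
      | some ab =>
          rw [hr] at h
          obtain ⟨ha, hb⟩ := ih (a := ab.1) (b := ab.2) (by simp [hr])
          have h' : (c :: ab.1, ab.2) = (a, b) := by simpa using h
          have h1 : c :: ab.1 = a := congrArg Prod.fst h'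
          have h2 : ab.2 = b := congrArg Prod.snd h'
          subst h1 h2
          refine ⟨?_, hb⟩
          rw [ha]; simp
      | none =>
          rw [hr] at h
          by_cases hc : c = '.'
          · rw [if_pos hc] at h
            have h' : (([] : List Char), rest) = (a, b) := by simpa using h
            have h1 : ([] : List Char) = a := congrArg Prod.fst h'
            have h2 : rest = b := congrArg Prod.snd h'
            subst h1 h2
            refine ⟨by simp [hc], ?_⟩
            intro hmem
            have hs := pvSplitLastDot_isSome hmem
            rw [hr] at hs; simp at hs
          · rw [if_neg hc] at h; simp at h

-- characterisation of the children map
theorem pvChildren_getD (I : PySem.Dict String (List (String × String))) (root : String) (p : String) :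
    (pvChildren I root).getD p []
      = ((I.items.filter
            (fun kv => !(kv.1 == root || !(PySem.Str.startswith kv.1 (root ++ "."))))).map
          (fun kv => ((pvRsplitDot kv.1).1, (kv.1, pvModD kv.2 "", (pvRsplitDot kv.1).2)))
          |>.filter (fun q => q.1 == p)).map (fun x => x.2) := by
  unfold pvChildren
  rw [pv_foldl_skip]
  have h3 : (I.items.filter
        (fun kv => !(kv.1 == root || !(PySem.Str.startswith kv.1 (root ++ "."))))).foldl
      (fun d kv => d.modify (pvRsplitDot kv.1).1 []
        (fun l => l ++ [(kv.1, pvModD kv.2 "", (pvRsplitDot kv.1).2)])) PySem.Dict.empty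
      = ((I.items.filter
            (fun kv => !(kv.1 == root || !(PySem.Str.startswith kv.1 (root ++ "."))))).map
          (fun kv => ((pvRsplitDot kv.1).1, (kv.1, pvModD kv.2 "", (pvRsplitDot kv.1).2)))).foldl
          (fun d q => d.modify q.1 [] (fun l => l ++ [q.2])) PySem.Dict.empty := by
    rw [List.foldl_map]
  rw [h3, PySem.Dict.getD_foldl_modify_append]
  simp

theorem pvChildren_nodup_keys (I : PySem.Dict String (List (String × String))) (root : String) :
    (pvChildren I root).keys.Nodup := by
  unfold pvChildren
  rw [pv_foldl_skip]
  exact PySem.Dict.nodup_keys_foldl_modify_key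
    (I.items.filter (fun kv => !(kv.1 == root || !(PySem.Str.startswith kv.1 (root ++ ".")))))
    (fun kv => (pvRsplitDot kv.1).1) []
    (fun _ kv => fun l => l ++ [(kv.1, pvModD kv.2 "", (pvRsplitDot kv.1).2)])
    PySem.Dict.empty PySem.Dict.nodup_keys_empty

theorem pv_mem_children_keys (I : PySem.Dict String (List (String × String))) (root q : String) :
    q ∈ (pvChildren I root).keys ↔
      q ∈ ((I.items.filter
            (fun kv => !(kv.1 == root || !(PySem.Str.startswith kv.1 (root ++ "."))))).map
          (fun kv => (pvRsplitDot kv.1).1)) := by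
  unfold pvChildren
  rw [pv_foldl_skip]
  simp only [PySem.Dict.keys_foldl_modify_key, PySem.Dict.keys_empty]
  rw [show PySem.Set.update ([] : PySem.Set String)
        ((I.items.filter
            (fun kv => !(kv.1 == root || !(PySem.Str.startswith kv.1 (root ++ "."))))).map
          (fun kv => (pvRsplitDot kv.1).1)) = PySem.Set.ofList _ from
      (PySem.Set.ofList_eq_foldl _).symm]
  exact PySem.Set.mem_ofList _ _

theorem pvChildren_keys_nonempty (I : PySem.Dict String (List (String × String))) (root : String)
    (p : String) (hp : p ∈ (pvChildren I root).keys) : (pvChildren I root).getD p [] ≠ [] := by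
  rw [pv_mem_children_keys] at hp
  simp only [List.mem_map] at hp
  obtain ⟨kv, hkv, hkvp⟩ := hp
  rw [pvChildren_getD]
  simp only [ne_eq, List.map_eq_nil_iff, List.filter_eq_nil_iff, not_forall]
  refine ⟨((pvRsplitDot kv.1).1, (kv.1, pvModD kv.2 "", (pvRsplitDot kv.1).2)), ?_, ?_⟩
  · exact List.mem_map.mpr ⟨kv, hkv, rfl⟩
  · simp [hkvp]

theorem pvInstances_nodup_keys (hd : List (String × List (String × String))) :
    (pvInstances hd).keys.Nodup := by
  unfold pvInstances
  rw [pv_foldl_skip]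
  exact PySem.Dict.nodup_keys_foldl_insert_key _ Prod.fst (fun d kv => kv.2) _
    PySem.Dict.nodup_keys_empty

-- facts about one entry of a children list
theorem pv_kid_facts (I : PySem.Dict String (List (String × String))) (root : String)
    (hI : I.keys.Nodup) {p : String} {x : String × String × String}
    (hx : x ∈ (pvChildren I root).getD p []) :
    x.1.toList = p.toList ++ '.' :: x.2.2.toList ∧ '.' ∉ x.2.2.toList ∧
    (x.1 == root) = false ∧ I.contains x.1 = true ∧
    x.2.1 = pvModD (I.getD x.1 []) "" ∧
    x.1.toList.length + 1 ≤ pvFuel I := by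
  rw [pvChildren_getD] at hx
  simp only [List.mem_map, List.mem_filter, Bool.not_eq_eq_eq_not, Bool.not_true,
    Bool.or_eq_false_iff] at hx
  obtain ⟨a, ⟨⟨kv, ⟨hkv_items, hkv_ne, hkv_sw⟩, rfl⟩, ha_p⟩, ha_x⟩ := hx
  have hp : (pvRsplitDot kv.1).1 = p := by simpa using ha_p
  have hpre : (root ++ ".").toList <+: kv.1.toList :=
    (PySem.Chars.startswith_iff _ _).mp (by rw [← PySem.Str.startswith_eq]; exact hkv_sw)
  have hdotmem : '.' ∈ kv.1.toList := by
    obtain ⟨t, ht⟩ := hpre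
    rw [← ht, String.toList_append]
    simp
  obtain ⟨ab, hab⟩ := Option.isSome_iff_exists.mp (pvSplitLastDot_isSome hdotmem)
  obtain ⟨hsplit, hnodot⟩ := pvSplitLastDot_some (a := ab.1) (b := ab.2) (by simpa using hab)
  have hx1 : (pvRsplitDot kv.1) = (String.ofList ab.1, String.ofList ab.2) := by
    unfold pvRsplitDot
    rw [hab]
  subst ha_x
  refine ⟨?_, ?_, hkv_ne, ?_, ?_, ?_⟩
  · show kv.1.toList = p.toList ++ '.' :: (pvRsplitDot kv.1).2.toList
    rw [← hp, hx1]
    simpa using hsplit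
  · show '.' ∉ (pvRsplitDot kv.1).2.toList
    rw [hx1]; simpa using hnodot
  · exact (PySem.Dict.contains_iff_mem_keys _ _).mpr (PySem.Dict.mem_keys_of_mem_items _ hkv_items)
  · show pvModD kv.2 "" = pvModD (I.getD kv.1 []) ""
    rw [PySem.Dict.getD_of_mem_items _ hkv_items hI]
  · show kv.1.toList.length + 1 ≤ pvFuel I
    have := (PySem.List.le_foldl_max_nat I.items (fun kv => kv.1.toList.length) 0).2 kv hkv_items
    unfold pvFuel
    omega

-- pvDots counts the dots
theorem pvDots_eq (s : String) : pvDots s = (s.toList.count '.' : Int) := by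
  unfold pvDots
  rw [PySem.List.foldl_beq_add_one]
  simp

theorem pv_kid_dots {x1 p r : String} (hlist : x1.toList = p.toList ++ '.' :: r.toList)
    (hnd : '.' ∉ r.toList) : pvDots x1 = pvDots p + 1 := by
  rw [pvDots_eq, pvDots_eq, hlist]
  have h0 : r.toList.count '.' = 0 := List.count_eq_zero.mpr hnd
  rw [List.count_append, List.count_cons, h0]
  simp

-- with fuel at most the path length, a node renders nothing (its children list is empty)
theorem pvRenderA_long (I : PySem.Dict String (List (String × String))) (root : String)
    (hI : I.keys.Nodup) :
    ∀ (g : Nat) (p m : String) (ind : Int), pvFuel I ≤ p.toList.length →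
      pvRenderA (pvChildren I root) g p m ind = [] := by
  intro g p m ind hp
  cases g with
  | zero => rfl
  | succ g' =>
      have hkids : (pvChildren I root).getD p [] = [] := by
        by_contra h
        obtain ⟨x, hx⟩ := List.exists_mem_of_ne_nil _ h
        obtain ⟨hlist, -, -, -, -, hfuel⟩ := pv_kid_facts I root hI hx
        have : x.1.toList.length = p.toList.length + 1 + x.2.2.toList.length := by
          rw [hlist]; simp; try omega
        omega
      simp [pvRenderA, hkids]

-- fuel stability of A's renderer
theorem pvRenderA_stable (I : PySem.Dict String (List (String × String))) (root : String)
    (hI : I.keys.Nodup) :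
    ∀ (f g : Nat) (p m : String) (ind : Int),
      pvFuel I ≤ f + p.toList.length → pvFuel I ≤ g + p.toList.length →
      pvRenderA (pvChildren I root) f p m ind = pvRenderA (pvChildren I root) g p m ind := by
  intro f
  induction f with
  | zero =>
      intro g p m ind hf hg
      rw [pvRenderA_long I root hI g p m ind (by omega)]
      rfl
  | succ f ih =>
      intro g p m ind hf hg
      cases g with
      | zero =>
          rw [pvRenderA_long I root hI (f + 1) p m ind (by omega)]
          rfl
      | succ g' =>
          simp only [pvRenderA]
          by_cases hk : (pvChildren I root).getD p [] = []
          · simp [hk]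
          · rw [if_neg hk, if_neg hk]
            apply PySem.List.foldl_congr_mem
            intro acc x hx
            have hxk : x ∈ (pvChildren I root).getD p [] :=
              (PySem.List.sorted_perm _ _ _).subset hx
            obtain ⟨hlist, -, -, -, -, -⟩ := pv_kid_facts I root hI hxk
            have hlen : x.1.toList.length = p.toList.length + 1 + x.2.2.toList.length := by
              rw [hlist]; simp; try omega
            rw [ih g' x.1 x.2.1 (ind + 2) (by omega) (by omega)]

-- proof-side abbreviations for B's table contents
def pvModB (I : PySem.Dict String (List (String × String))) (root root_module q : String) : String :=
  if q == root then root_module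
  else if I.contains q then pvModD (I.getD q []) "" else ""

def pvRR (I : PySem.Dict String (List (String × String))) (root root_module q : String) :
    List String :=
  pvRenderA (pvChildren I root) (pvFuel I) q (pvModB I root root_module q)
    (2 * (pvDots q - pvDots root))

def pvKs (I : PySem.Dict String (List (String × String))) (root : String) : List String :=
  PySem.List.sorted (pvChildren I root).keys (fun p => PySem.Str.len p) true

-- one block of B equals A's renderer at that key
theorem pv_block_eq (I : PySem.Dict String (List (String × String))) (root root_module : String)
    (hI : I.keys.Nodup) (done : List String) (p : String) (todo : List String)
    (sub : PySem.Dict String (List String))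
    (hks : pvKs I root = done ++ p :: todo)
    (hsub : ∀ q, sub.getD q [] = if q ∈ done then pvRR I root root_module q else []) :
    pvBlock I (pvChildren I root) sub root root_module p = pvRR I root root_module p := by
  have hperm := PySem.List.sorted_perm (pvChildren I root).keys (fun p => PySem.Str.len p) true
  have hpks : p ∈ pvKs I root := by rw [hks]; simp
  have hpkeys : p ∈ (pvChildren I root).keys := hperm.subset hpks
  have hkids : (pvChildren I root).getD p [] ≠ [] := pvChildren_keys_nonempty I root p hpkeys
  have hpw : (done ++ p :: todo).Pairwise
      (fun a b => PySem.Str.len b ≤ PySem.Str.len a) := by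
    rw [← hks]
    exact PySem.List.sorted_pairwise_rev (pvChildren I root).keys (fun p => PySem.Str.len p)
  have hdone : ∀ cp : String, p.toList.length < cp.toList.length →
      cp ∈ (pvChildren I root).keys → cp ∈ done := by
    intro cp hlen hcp
    have hmemks : cp ∈ done ++ p :: todo := by rw [← hks]; exact hperm.mem_iff.mpr hcp
    rcases List.mem_append.mp hmemks with h | h
    · exact h
    · exfalso
      rcases List.mem_cons.mp h with rfl | h
      · omega
      · have h2 := (List.pairwise_append.mp hpw).2.1
        have h3 := (List.pairwise_cons.mp h2).1 cp h
        rw [PySem.Str.len_eq, PySem.Str.len_eq] at h3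
        omega
  obtain ⟨F, hF⟩ : ∃ F, pvFuel I = F + 1 := ⟨_, rfl⟩
  rw [pvRR, hF]
  simp only [pvRenderA]
  rw [if_neg hkids]
  rw [pvBlock]
  simp only [pvModB]
  apply PySem.List.foldl_congr_mem
  intro acc x hx
  have hxk : x ∈ (pvChildren I root).getD p [] := (PySem.List.sorted_perm _ _ _).subset hx
  obtain ⟨hlist, hdotfree, hrne, hcont, hmod, hfuel⟩ := pv_kid_facts I root hI hxk
  have hlen : x.1.toList.length = p.toList.length + 1 + x.2.2.toList.length := by
    rw [hlist]; simp; try omega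
  have hdots : pvDots x.1 = pvDots p + 1 := pv_kid_dots hlist hdotfree
  congr 1
  have hstF : pvRenderA (pvChildren I root) F x.1 x.2.1 (2 * (pvDots p - pvDots root) + 2)
      = pvRenderA (pvChildren I root) (pvFuel I) x.1 x.2.1
          (2 * (pvDots p - pvDots root) + 2) :=
    pvRenderA_stable I root hI F (pvFuel I) x.1 x.2.1 _ (by omega) (by omega)
  rw [hstF, hsub x.1]
  by_cases hxdone : x.1 ∈ done
  · rw [if_pos hxdone, pvRR]
    have hm : pvModB I root root_module x.1 = x.2.1 := by
      rw [pvModB, hrne]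
      simp only [Bool.false_eq_true, if_false, hcont, if_true]
      exact hmod.symm
    have hi : 2 * (pvDots x.1 - pvDots root) = 2 * (pvDots p - pvDots root) + 2 := by
      rw [hdots]; ring
    rw [hm, hi]
  · rw [if_neg hxdone]
    have hxnk : x.1 ∉ (pvChildren I root).keys := by
      intro hk
      exact hxdone (hdone x.1 (by omega) hk)
    have hc : (pvChildren I root).contains x.1 = false := by
      cases h : (pvChildren I root).contains x.1
      · rfl
      · exact absurd ((PySem.Dict.contains_iff_mem_keys _ _).mp h) hxnk
    have hg : (pvChildren I root).getD x.1 [] = [] :=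
      PySem.Dict.getD_of_not_contains _ _ hc
    rw [hF]
    simp [pvRenderA, hg]

-- the bottom-up fold computes A's renderer at every processed key
theorem pv_fold_aux (I : PySem.Dict String (List (String × String))) (root root_module : String)
    (hI : I.keys.Nodup) :
    ∀ (todo done : List String) (sub : PySem.Dict String (List String)),
      pvKs I root = done ++ todo →
      (∀ q, sub.getD q [] = if q ∈ done then pvRR I root root_module q else []) →
      ∀ q, (todo.foldl
              (fun sub p => sub.insert p (pvBlock I (pvChildren I root) sub root root_module p))
              sub).getD q []
            = if q ∈ done ++ todo then pvRR I root root_module q else [] := by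
  intro todo
  induction todo with
  | nil =>
      intro done sub hks hsub q
      simpa using hsub q
  | cons p todo ih =>
      intro done sub hks hsub q
      have hblock : pvBlock I (pvChildren I root) sub root root_module p
          = pvRR I root root_module p :=
        pv_block_eq I root root_module hI done p todo sub hks hsub
      have hnd : (pvKs I root).Nodup :=
        ((PySem.List.sorted_perm _ _ _).nodup_iff).mpr (pvChildren_nodup_keys I root)
      have hpnotdone : p ∉ done := by
        rw [hks] at hnd
        intro hp
        exact (List.nodup_append.mp hnd).2.2 p hp p (by simp) rfl
      simp only [List.foldl_cons]
      have hstep := ih (done ++ [p])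
        (sub.insert p (pvBlock I (pvChildren I root) sub root root_module p))
        (by rw [hks]; simp) ?_ q
      · rw [hstep]
        by_cases hq : q ∈ done ++ p :: todo
        · rw [if_pos hq, if_pos (by simpa using hq)]
        · rw [if_neg hq, if_neg (by simpa using hq)]
      · intro q'
        rw [PySem.Dict.getD_insert]
        by_cases hq' : q' = p
        · subst hq'
          rw [if_pos rfl, hblock, if_pos (by simp)]
        · rw [if_neg hq', hsub q']
          by_cases hq'd : q' ∈ done
          · rw [if_pos hq'd, if_pos (by simp [hq'd])]
          · rw [if_neg hq'd, if_neg (by simp [hq'd, hq'])]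

theorem pv_fold_invariant (I : PySem.Dict String (List (String × String)))
    (root root_module : String) (hI : I.keys.Nodup) :
    ∀ q, (((PySem.List.sorted (pvChildren I root).keys (fun p => PySem.Str.len p) true).foldl
            (fun sub p => sub.insert p (pvBlock I (pvChildren I root) sub root root_module p))
            PySem.Dict.empty).getD q [])
          = if q ∈ (pvChildren I root).keys then pvRR I root root_module q else [] := by
  intro q
  have h := pv_fold_aux I root root_module hI (pvKs I root) [] PySem.Dict.empty (by simp)
    (by intro q'; simp [PySem.Dict.getD_empty]) q
  rw [show pvKs I root = PySem.List.sorted (pvChildren I root).keys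
      (fun p => PySem.Str.len p) true from rfl] at h
  rw [h]
  have hmem : q ∈ ([] : List String) ++ PySem.List.sorted (pvChildren I root).keys
      (fun p => PySem.Str.len p) true ↔ q ∈ (pvChildren I root).keys := by
    simp
  by_cases hq : q ∈ (pvChildren I root).keys
  · rw [if_pos (hmem.mpr hq), if_pos hq]
  · rw [if_neg (fun h' => hq (hmem.mp h')), if_neg hq]

-- ===== VERDICT (by name: the statement is the Claim_ definition above) =====
theorem format_hierarchy_py_spec : Claim_equal_format_hierarchy_py := by
  intro hd st _
  show format_hierarchy_py hd st = format_hierarchy_py_alt hd st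
  unfold format_hierarchy_py format_hierarchy_py_alt
  by_cases h1 : (pvInstances hd).items = []
  · simp [h1]
  · simp only [if_neg h1]
    cases hr : pvRoot? (pvInstances hd) st with
    | none => rfl
    | some root =>
        have hI := pvInstances_nodup_keys hd
        have hinv := pv_fold_invariant (pvInstances hd) root
          (pvModD ((pvInstances hd).getD root []) st) hI root
        refine congrArg (PySem.Str.join "\n") (congrArg _ ?_)
        rw [hinv]
        by_cases hk : root ∈ (pvChildren (pvInstances hd) root).keys
        · rw [if_pos hk, pvRR]
          have hm : pvModB (pvInstances hd) root (pvModD ((pvInstances hd).getD root []) st) root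
              = pvModD ((pvInstances hd).getD root []) st := by
            rw [pvModB]
            simp
          have hi : 2 * (pvDots root - pvDots root) = (0 : Int) := by ring
          rw [hm, hi]
        · rw [if_neg hk]
          have hc : (pvChildren (pvInstances hd) root).contains root = false := by
            cases h : (pvChildren (pvInstances hd) root).contains root
            · rfl
            · exact absurd ((PySem.Dict.contains_iff_mem_keys _ _).mp h) hk
          have hg : (pvChildren (pvInstances hd) root).getD root [] = [] :=
            PySem.Dict.getD_of_not_contains _ _ hc
          obtain ⟨F, hF⟩ : ∃ F, pvFuel (pvInstances hd) = F + 1 := ⟨_, rfl⟩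
          rw [hF]
          simp [pvRenderA, hg]
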